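-- pv_equiv track=rewrite | github.com/MetaGLM/FinGLM | code/馒头科技/mantoutech/recall_report_text.py | merge_idx
-- ===== SOURCE A (Python) =====
-- def merge_idx(indexes, total_len, prefix=0, suffix=1):
--     merged_idx = []
--     for index in indexes:
--         start = max(0, index-prefix)
--         end = min(total_len, index+suffix+1)
--         merged_idx.extend([i for i in range(start, end)])
--     merged_idx = sorted(list(set(merged_idx)))
--
--     block_idxes = []
--
--     if len(merged_idx) == 0:
--         return block_idxes
--
--     current_block_idxes = [merged_idx[0]]
--     for i in range(1, len(merged_idx)):
--         if merged_idx[i] - merged_idx[i-1] > 1: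
--             # block = [lines[idx] for idx in current_block_idxes]
--             # text_blocks.append('\n'.join(block))
--             block_idxes.append(current_block_idxes)
--             current_block_idxes = [merged_idx[i]]
--         else:
--             current_block_idxes.append(merged_idx[i])
--     if len(current_block_idxes) > 0:
--         block_idxes.append(current_block_idxes)
--
--     return block_idxes
-- ===== SOURCE B (Python) =====
-- def merge_idx(indexes, total_len, prefix=0, suffix=1):
--     # Each index covers the half-open interval [max(0, i-prefix), min(total_len, i+suffix+1)).
--     # Sort the non-empty intervals by start, merge overlapping/adjacent ones, then enumerate.
--     ivs = [(max(0, i - prefix), min(total_len, i + suffix + 1)) for i in indexes]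
--     ivs = [(s, e) for (s, e) in ivs if s < e]
--     ivs.sort(key=lambda p: p[0])
--     blocks = []
--     cur = None
--     for s, e in ivs:
--         if cur is None:
--             cur = (s, e)
--         elif s <= cur[1]:
--             if e > cur[1]:
--                 cur = (cur[0], e)
--         else:
--             blocks.append(cur)
--             cur = (s, e)
--     if cur is not None:
--         blocks.append(cur)
--     return [list(range(s, e)) for s, e in blocks]
-- ===== Notes on version B (the rewrite author's own statement) =====
-- stated objective: faster
-- what changed: Instead of expanding every index into its whole window, deduplicating and sorting the expanded positions and regrouping them by gap, B sorts the n windows as half-open intervals, merges overlapping/adjacent intervals in one pass, and enumerates each merged block once.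
import Mathlib
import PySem

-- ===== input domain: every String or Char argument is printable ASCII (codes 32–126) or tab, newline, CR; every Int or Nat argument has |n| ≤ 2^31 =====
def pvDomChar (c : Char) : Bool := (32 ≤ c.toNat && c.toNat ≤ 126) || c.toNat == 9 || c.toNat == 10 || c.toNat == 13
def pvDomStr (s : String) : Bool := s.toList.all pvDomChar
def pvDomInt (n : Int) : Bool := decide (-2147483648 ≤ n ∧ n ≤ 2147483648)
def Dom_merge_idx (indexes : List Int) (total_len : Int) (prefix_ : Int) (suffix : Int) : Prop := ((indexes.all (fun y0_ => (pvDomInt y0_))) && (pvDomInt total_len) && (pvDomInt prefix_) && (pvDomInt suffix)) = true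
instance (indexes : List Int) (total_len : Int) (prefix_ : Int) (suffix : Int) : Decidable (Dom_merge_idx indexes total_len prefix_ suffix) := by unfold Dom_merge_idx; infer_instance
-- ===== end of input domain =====

-- B replaces A's "expand every index into its whole window, dedup, sort, regroup" by
-- "sort the n windows as intervals, merge overlapping/adjacent ones, enumerate each block once"
-- (objective: faster — no per-element dedup/sort of the expanded indices).

-- ===== PORT A =====
-- A-side helper: the body of A's second loop (over i in range(1, len(merged_idx))).
def astep (xs : List Int) (st : List (List Int) × List Int) (i : Int) : List (List Int) × List Int :=
  if PySem.List.pyGetD xs i 0 - PySem.List.pyGetD xs (i - 1) 0 > 1 then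
    (st.1 ++ [st.2], [PySem.List.pyGetD xs i 0])
  else
    (st.1, st.2 ++ [PySem.List.pyGetD xs i 0])

def merge_idx (indexes : List Int) (total_len : Int) (prefix_ : Int) (suffix : Int) : List (List Int) :=
  let raw := indexes.foldl (fun acc index =>
    acc ++ PySem.List.pyRange (max 0 (index - prefix_)) (min total_len (index + suffix + 1)) 1) []
  let ms := PySem.List.sorted (PySem.Set.ofList raw) (fun x => x) false
  match ms with
  | [] => []
  | m0 :: _ =>
    let st := (PySem.List.pyRange 1 (ms.length : Int) 1).foldl (astep ms) ([], [m0])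
    if st.2.length > 0 then st.1 ++ [st.2] else st.1

-- ===== PORT B =====
-- B-side helper: the body of B's merge loop.
def bstep (st : List (Int × Int) × Option (Int × Int)) (p : Int × Int) :
    List (Int × Int) × Option (Int × Int) :=
  match st.2 with
  | none => (st.1, some p)
  | some c =>
    if p.1 ≤ c.2 then (if p.2 > c.2 then (st.1, some (c.1, p.2)) else st)
    else (st.1 ++ [c], some p)

def merge_idx_alt (indexes : List Int) (total_len : Int) (prefix_ : Int) (suffix : Int) : List (List Int) :=
  let ivs := indexes.map (fun i => (max 0 (i - prefix_), min total_len (i + suffix + 1)))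
  let ivs2 := ivs.filter (fun p => decide (p.1 < p.2))
  let ivs3 := PySem.List.sorted ivs2 (fun p => p.1) false
  let st := ivs3.foldl bstep ([], none)
  let blocks := st.1 ++ (match st.2 with | some c => [c] | none => [])
  blocks.map (fun p => PySem.List.pyRange p.1 p.2 1)

-- ===== PRECONDITION & SPEC =====
def Spec_merge_idx (indexes : List Int) (total_len : Int) (prefix_ : Int) (suffix : Int) (out : List (List Int)) : Prop := out = merge_idx_alt indexes total_len prefix_ suffix
instance (indexes : List Int) (total_len : Int) (prefix_ : Int) (suffix : Int) (out : List (List Int)) : Decidable (Spec_merge_idx indexes total_len prefix_ suffix out) := by unfold Spec_merge_idx; infer_instance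

-- ===== CLAIM (what is proved, stated in full; the proofs are below) =====
def Claim_equal_merge_idx : Prop := ∀ (indexes : List Int) (total_len : Int) (prefix_ : Int) (suffix : Int), Dom_merge_idx indexes total_len prefix_ suffix → Spec_merge_idx indexes total_len prefix_ suffix (merge_idx indexes total_len prefix_ suffix)

-- ===== LEMMAS AND PROOFS =====

def mergeRec (c : Int × Int) : List (Int × Int) → List (Int × Int)
  | [] => [c]
  | p :: t => if p.1 ≤ c.2 then mergeRec (c.1, if p.2 > c.2 then p.2 else c.2) t
              else c :: mergeRec p t

def pairRun (prev : Int) (st : List (List Int) × List Int) : List Int → List (List Int) × List Int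
  | [] => st
  | x :: t => pairRun x (if x - prev > 1 then (st.1 ++ [st.2], [x]) else (st.1, st.2 ++ [x])) t

def runs (prev : Int) (blocks : List (List Int)) (cur : List Int) : List Int → List (List Int)
  | [] => blocks ++ [cur]
  | x :: t => if x - prev > 1 then runs x (blocks ++ [cur]) [x] t else runs x blocks (cur ++ [x]) t

lemma bfold (t : List (Int × Int)) : ∀ (c : Int × Int) (blocks : List (Int × Int)),
    (t.foldl bstep (blocks, some c)).1 ++
      (match (t.foldl bstep (blocks, some c)).2 with | some c => [c] | none => []) =
    blocks ++ mergeRec c t := by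
  induction t with
  | nil => intro c blocks; simp [mergeRec]
  | cons p t ih =>
    intro c blocks
    simp only [List.foldl_cons, bstep, mergeRec]
    by_cases h1 : p.1 ≤ c.2
    · simp only [h1, if_pos]
      by_cases h2 : p.2 > c.2
      · simpa [h1, h2] using ih (c.1, p.2) blocks
      · simpa [h1, h2] using ih c blocks
    · simpa [h1] using ih p (blocks ++ [c])

lemma pairRun_runs (t : List Int) : ∀ prev blocks cur,
    (pairRun prev (blocks, cur) t).1 ++ [(pairRun prev (blocks, cur) t).2] = runs prev blocks cur t := by
  induction t with
  | nil => intro prev blocks cur; simp [pairRun, runs]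
  | cons x t ih =>
    intro prev blocks cur
    simp only [pairRun, runs]
    by_cases h : x - prev > 1
    · simpa [h] using ih x (blocks ++ [cur]) [x]
    · simpa [h] using ih x blocks (cur ++ [x])

lemma pairRun_snd_ne_nil (t : List Int) : ∀ prev (st : List (List Int) × List Int),
    st.2 ≠ [] → (pairRun prev st t).2 ≠ [] := by
  induction t with
  | nil => intro _ _ h; simpa [pairRun] using h
  | cons x t ih =>
    intro prev st h
    simp only [pairRun]
    by_cases hc : x - prev > 1
    · simpa [hc] using ih x _ (by simp)
    · simpa [hc] using ih x _ (by simp)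

lemma mergeRec_start_le (t : List (Int × Int)) : ∀ c, (∀ p ∈ t, c.1 ≤ p.1) →
    t.Pairwise (fun p q => p.1 ≤ q.1) → ∀ q ∈ mergeRec c t, c.1 ≤ q.1 := by
  induction t with
  | nil => intro c _ _ q hq; simp [mergeRec] at hq; simp [hq]
  | cons p t ih =>
    intro c hle hpw q hq
    simp only [mergeRec] at hq
    rcases List.pairwise_cons.1 hpw with ⟨hp, hpw'⟩
    by_cases h1 : p.1 ≤ c.2
    · simp only [h1, if_pos] at hq
      exact ih (c.1, if p.2 > c.2 then p.2 else c.2) (fun r hr => hle r (List.mem_cons_of_mem _ hr)) hpw' q hq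
    · simp only [h1, if_neg, not_false_iff, List.mem_cons] at hq
      rcases hq with rfl | hq
      · rfl
      · exact le_trans (hle p (List.mem_cons_self)) (ih p hp hpw' q hq)

lemma mergeRec_pos (t : List (Int × Int)) : ∀ c, c.1 < c.2 → (∀ p ∈ t, p.1 < p.2) →
    ∀ q ∈ mergeRec c t, q.1 < q.2 := by
  induction t with
  | nil => intro c hc _ q hq; simp [mergeRec] at hq; simpa [hq] using hc
  | cons p t ih =>
    intro c hc hall q hq
    simp only [mergeRec] at hq
    by_cases h1 : p.1 ≤ c.2
    · simp only [h1, if_pos] at hq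
      refine ih _ ?_ (fun r hr => hall r (List.mem_cons_of_mem _ hr)) q hq
      by_cases h2 : p.2 > c.2 <;> simp [h2] <;> omega
    · simp only [h1, if_neg, not_false_iff, List.mem_cons] at hq
      rcases hq with rfl | hq
      · exact hc
      · exact ih p (hall p List.mem_cons_self) (fun r hr => hall r (List.mem_cons_of_mem _ hr)) q hq

lemma mergeRec_gap (t : List (Int × Int)) : ∀ c, (∀ p ∈ t, c.1 ≤ p.1) →
    t.Pairwise (fun p q => p.1 ≤ q.1) →
    (mergeRec c t).Pairwise (fun p q => p.2 < q.1) := by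
  induction t with
  | nil => intro c _ _; simp [mergeRec]
  | cons p t ih =>
    intro c hle hpw
    rcases List.pairwise_cons.1 hpw with ⟨hp, hpw'⟩
    simp only [mergeRec]
    by_cases h1 : p.1 ≤ c.2
    · simp only [h1, if_pos]
      exact ih (c.1, _) (fun r hr => hle r (List.mem_cons_of_mem _ hr)) hpw'
    · simp only [h1, if_neg, not_false_iff]
      refine List.pairwise_cons.2 ⟨?_, ih p hp hpw'⟩
      intro q hq
      have := mergeRec_start_le t p hp hpw' q hq
      omega

lemma mergeRec_cover (t : List (Int × Int)) : ∀ c (x : Int), (∀ p ∈ t, c.1 ≤ p.1) →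
    t.Pairwise (fun p q => p.1 ≤ q.1) →
    ((∃ q ∈ mergeRec c t, q.1 ≤ x ∧ x < q.2) ↔ (∃ q ∈ c :: t, q.1 ≤ x ∧ x < q.2)) := by
  induction t with
  | nil => intro c x _ _; simp [mergeRec]
  | cons p t ih =>
    intro c x hle hpw
    rcases List.pairwise_cons.1 hpw with ⟨hp, hpw'⟩
    have hcp : c.1 ≤ p.1 := hle p List.mem_cons_self
    simp only [mergeRec]
    by_cases h1 : p.1 ≤ c.2
    · simp only [h1, if_pos]
      rw [ih (c.1, if p.2 > c.2 then p.2 else c.2) x (fun r hr => hle r (List.mem_cons_of_mem _ hr)) hpw']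
      constructor
      · rintro ⟨q, hq, hx⟩
        rcases List.mem_cons.1 hq with rfl | hq
        · by_cases h2 : p.2 > c.2
          · simp only [h2, if_pos] at hx
            by_cases hxc : x < c.2
            · exact ⟨c, List.mem_cons_self, by omega⟩
            · exact ⟨p, List.mem_cons_of_mem _ List.mem_cons_self, by omega⟩
          · simp only [h2] at hx
            exact ⟨c, List.mem_cons_self, by omega⟩
        · exact ⟨q, List.mem_cons_of_mem _ (List.mem_cons_of_mem _ hq), hx⟩
      · rintro ⟨q, hq, hx⟩
        rcases List.mem_cons.1 hq with hqc | hq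
        · exact ⟨(c.1, if p.2 > c.2 then p.2 else c.2), List.mem_cons_self, by subst hqc; split <;> omega⟩
        rcases List.mem_cons.1 hq with hqp | hq
        · exact ⟨(c.1, if p.2 > c.2 then p.2 else c.2), List.mem_cons_self, by subst hqp; split <;> omega⟩
        · exact ⟨q, List.mem_cons_of_mem _ hq, hx⟩
    · simp only [h1, if_neg, not_false_iff]
      constructor
      · rintro ⟨q, hq, hx⟩
        rcases List.mem_cons.1 hq with rfl | hq
        · exact ⟨q, List.mem_cons_self, hx⟩
        · rcases (ih p x hp hpw').1 ⟨q, hq, hx⟩ with ⟨r, hr, hxr⟩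
          exact ⟨r, List.mem_cons_of_mem _ hr, hxr⟩
      · rintro ⟨q, hq, hx⟩
        rcases List.mem_cons.1 hq with rfl | hq
        · exact ⟨q, List.mem_cons_self, hx⟩
        · rcases (ih p x hp hpw').2 ⟨q, hq, hx⟩ with ⟨r, hr, hxr⟩
          exact ⟨r, List.mem_cons_of_mem _ hr, hxr⟩

lemma getD_append_mid (pre : List Int) (a : Int) (rest : List Int) (d : Int) :
    (pre ++ a :: rest).getD pre.length d = a := by
  simp [List.getD_eq_getElem?_getD]

lemma pyGetD_append_mid (pre : List Int) (a : Int) (rest : List Int) (d : Int) :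
    PySem.List.pyGetD (pre ++ a :: rest) (pre.length : Int) d = a := by
  rw [PySem.List.pyGetD_natCast, getD_append_mid]

lemma afold (rest : List Int) : ∀ (pre : List Int) (prev : Int) (st : List (List Int) × List Int),
    (PySem.List.pyRange ((pre.length : Int) + 1) ((pre.length : Int) + 1 + rest.length) 1).foldl
      (astep (pre ++ prev :: rest)) st = pairRun prev st rest := by
  induction rest with
  | nil =>
    intro pre prev st
    rw [PySem.List.pyRange_one_eq_nil (by simp)]
    simp [pairRun]
  | cons x t ih =>
    intro pre prev st
    rw [PySem.List.pyRange_one_cons (by simp only [List.length_cons]; push_cast; omega)]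
    rw [List.foldl_cons]
    have h1 : PySem.List.pyGetD (pre ++ prev :: x :: t) ((pre.length : Int) + 1) 0 = x := by
      rw [show ((pre.length : Int) + 1) = (((pre ++ [prev]).length : Nat) : Int) by simp]
      rw [show pre ++ prev :: x :: t = (pre ++ [prev]) ++ x :: t by simp]
      exact pyGetD_append_mid (pre ++ [prev]) x t 0
    have h2 : PySem.List.pyGetD (pre ++ prev :: x :: t) ((pre.length : Int) + 1 - 1) 0 = prev := by
      rw [show ((pre.length : Int) + 1 - 1) = ((pre.length : Nat) : Int) by ring]
      exact pyGetD_append_mid pre prev (x :: t) 0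
    have hstep : astep (pre ++ prev :: x :: t) st ((pre.length : Int) + 1)
        = (if x - prev > 1 then (st.1 ++ [st.2], [x]) else (st.1, st.2 ++ [x])) := by
      rw [astep, h1, h2]
    rw [hstep]
    have h3 := ih (pre ++ [prev]) x (if x - prev > 1 then (st.1 ++ [st.2], [x]) else (st.1, st.2 ++ [x]))
    rw [show pairRun prev st (x :: t)
        = pairRun x (if x - prev > 1 then (st.1 ++ [st.2], [x]) else (st.1, st.2 ++ [x])) t from rfl]
    simp only [List.append_assoc, List.singleton_append, List.length_append, List.length_cons] at h3 ⊢
    push_cast at h3 ⊢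
    ring_nf at h3 ⊢
    exact h3

lemma runs_range (n : Nat) : ∀ (a : Int) (blocks : List (List Int)) (cur : List Int) (t : List Int),
    runs (a - 1) blocks cur (PySem.List.pyRange a (a + n) 1 ++ t) =
    runs (a + n - 1) blocks (cur ++ PySem.List.pyRange a (a + n) 1) t := by
  induction n with
  | zero =>
    intro a blocks cur t
    rw [PySem.List.pyRange_one_eq_nil (by simp)]
    simp
  | succ n ih =>
    intro a blocks cur t
    rw [PySem.List.pyRange_one_cons (by push_cast; omega)]
    have hne : ¬ (a - (a - 1) > 1) := by omega
    simp only [List.cons_append, runs, hne, if_neg, not_false_iff]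
    have h3 := ih (a + 1) blocks (cur ++ [a]) t
    simp only [add_sub_cancel_right, List.append_assoc, List.singleton_append] at h3 ⊢
    push_cast at h3 ⊢
    ring_nf at h3 ⊢
    exact h3

lemma cons_pyRange (a b : Int) (h : a < b) :
    a :: PySem.List.pyRange (a + 1) b 1 = PySem.List.pyRange a b 1 :=
  (PySem.List.pyRange_one_cons h).symm

lemma runs_block (p : Int × Int) (hp : p.1 < p.2) (blocks : List (List Int)) (rest : List Int) :
    runs p.1 blocks [p.1] (PySem.List.pyRange (p.1 + 1) p.2 1 ++ rest) =
      runs (p.2 - 1) blocks (PySem.List.pyRange p.1 p.2 1) rest := by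
  have hn : (p.1 + 1) + (((p.2 - (p.1 + 1)).toNat : Nat) : Int) = p.2 := by omega
  have hr := runs_range (p.2 - (p.1 + 1)).toNat (p.1 + 1) blocks [p.1] rest
  rw [hn] at hr
  simp only [show p.1 + 1 - 1 = p.1 from by ring] at hr
  rw [hr, List.singleton_append, cons_pyRange p.1 p.2 hp]

lemma runs_flatten (M : List (Int × Int)) : ∀ (prev : Int) (blocks : List (List Int)) (cur : List Int),
    (∀ p ∈ M, p.1 < p.2) → M.Pairwise (fun p q => p.2 < q.1) →
    (∀ p, M.head? = some p → p.1 - prev > 1) →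
    runs prev blocks cur ((M.map (fun p => PySem.List.pyRange p.1 p.2 1)).flatten) =
      blocks ++ [cur] ++ M.map (fun p => PySem.List.pyRange p.1 p.2 1) := by
  induction M with
  | nil => intro prev blocks cur _ _ _; simp [runs]
  | cons p M ih =>
    intro prev blocks cur hpos hgap hhead
    have hp : p.1 < p.2 := hpos p List.mem_cons_self
    rcases List.pairwise_cons.1 hgap with ⟨hgp, hgap'⟩
    simp only [List.map_cons, List.flatten_cons]
    rw [PySem.List.pyRange_one_cons hp, List.cons_append]
    have hd : p.1 - prev > 1 := hhead p rfl
    rw [show runs prev blocks cur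
          (p.1 :: (PySem.List.pyRange (p.1 + 1) p.2 1 ++ (M.map (fun p => PySem.List.pyRange p.1 p.2 1)).flatten))
        = runs p.1 (blocks ++ [cur]) [p.1]
          (PySem.List.pyRange (p.1 + 1) p.2 1 ++ (M.map (fun p => PySem.List.pyRange p.1 p.2 1)).flatten)
      from by simp [runs, hd]]
    rw [runs_block p hp (blocks ++ [cur]) _]
    rw [ih (p.2 - 1) (blocks ++ [cur]) (PySem.List.pyRange p.1 p.2 1)
      (fun q hq => hpos q (List.mem_cons_of_mem _ hq)) hgap'
      (fun q hq => by
        have := hgp q (List.mem_of_mem_head? hq)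
        omega)]
    rw [cons_pyRange p.1 p.2 hp]
    simp

-- A's post-sort phase as a function of the sorted deduplicated list.
def aMain (ms : List Int) : List (List Int) :=
  match ms with
  | [] => []
  | m0 :: _ =>
    let st := (PySem.List.pyRange 1 (ms.length : Int) 1).foldl (astep ms) ([], [m0])
    if st.2.length > 0 then st.1 ++ [st.2] else st.1

lemma aMain_cons (m0 : Int) (tl : List Int) : aMain (m0 :: tl) = runs m0 [] [m0] tl := by
    simp only [aMain]
    have h0 := afold tl [] m0 ([], [m0])
    simp only [List.length_nil, Nat.cast_zero, zero_add, List.nil_append] at h0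
    rw [show ((m0 :: tl).length : Int) = 1 + (tl.length : Int) from by
      simp [List.length_cons]; ring]
    rw [h0]
    have hne := pairRun_snd_ne_nil tl m0 ([], [m0]) (by simp)
    rw [if_pos (by simpa [List.length_pos_iff] using hne)]
    exact pairRun_runs tl m0 [] [m0]

lemma aMain_flatten (M : List (Int × Int))
    (hpos : ∀ p ∈ M, p.1 < p.2) (hgap : M.Pairwise (fun p q => p.2 < q.1)) :
    aMain ((M.map (fun p => PySem.List.pyRange p.1 p.2 1)).flatten) =
      M.map (fun p => PySem.List.pyRange p.1 p.2 1) := by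
  cases M with
  | nil => simp [aMain]
  | cons p M =>
    have hp : p.1 < p.2 := hpos p List.mem_cons_self
    rcases List.pairwise_cons.1 hgap with ⟨hgp, hgap'⟩
    simp only [List.map_cons, List.flatten_cons]
    rw [PySem.List.pyRange_one_cons hp, List.cons_append, aMain_cons]
    rw [runs_block p hp [] _]
    rw [runs_flatten M (p.2 - 1) [] (PySem.List.pyRange p.1 p.2 1)
      (fun q hq => hpos q (List.mem_cons_of_mem _ hq)) hgap'
      (fun q hq => by
        have := hgp q (List.mem_of_mem_head? hq)
        omega)]
    rw [cons_pyRange p.1 p.2 hp]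
    simp

-- The merged interval list B computes from a filtered, sorted interval list.
def mergeM (L : List (Int × Int)) : List (Int × Int) :=
  match PySem.List.sorted (L.filter (fun p => decide (p.1 < p.2))) (fun p => p.1) false with
  | [] => []
  | c :: t => mergeRec c t

lemma bout (ivs3 : List (Int × Int)) :
    (ivs3.foldl bstep ([], none)).1 ++
      (match (ivs3.foldl bstep ([], none)).2 with | some c => [c] | none => []) =
    (match ivs3 with | [] => [] | c :: t => mergeRec c t) := by
  cases ivs3 with
  | nil => rfl
  | cons c t =>
    have h0 : bstep ([], none) c = ([], some c) := rfl
    rw [List.foldl_cons, h0]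
    simpa using bfold t c []

lemma alt_eq_mergeM (indexes : List Int) (total_len prefix_ suffix : Int) :
    merge_idx_alt indexes total_len prefix_ suffix =
      (mergeM (indexes.map (fun i => (max 0 (i - prefix_), min total_len (i + suffix + 1))))).map
        (fun p => PySem.List.pyRange p.1 p.2 1) := by
  unfold merge_idx_alt mergeM
  dsimp only
  rw [bout]

lemma mergeM_props (L : List (Int × Int)) :
    (∀ q ∈ mergeM L, q.1 < q.2) ∧ (mergeM L).Pairwise (fun p q => p.2 < q.1) ∧
      (∀ x : Int, (∃ q ∈ mergeM L, q.1 ≤ x ∧ x < q.2) ↔ (∃ q ∈ L, q.1 ≤ x ∧ x < q.2)) := by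
  unfold mergeM
  rcases hs : PySem.List.sorted (L.filter (fun p => decide (p.1 < p.2))) (fun p => p.1) false with
    _ | ⟨c, t⟩
  · simp only [hs]
    refine ⟨by simp, by simp, fun x => ?_⟩
    simp only [List.not_mem_nil, false_and, exists_const, false_iff]
    rintro ⟨q, hq, hx⟩
    have hq2 : q ∈ L.filter (fun p => decide (p.1 < p.2)) := by
      rw [List.mem_filter]
      exact ⟨hq, by simp; omega⟩
    rw [← PySem.List.mem_sorted _ (fun p : Int × Int => p.1) false, hs] at hq2
    simp at hq2
  · simp only [hs]
    have hpw : (c :: t).Pairwise (fun p q : Int × Int => p.1 ≤ q.1) := by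
      rw [← hs]; exact PySem.List.sorted_pairwise _ _
    rcases List.pairwise_cons.1 hpw with ⟨hle, hpw'⟩
    have hmem : ∀ q : Int × Int, q ∈ c :: t ↔ q ∈ L ∧ q.1 < q.2 := by
      intro q
      rw [← hs, PySem.List.mem_sorted _ (fun p : Int × Int => p.1) false, List.mem_filter]
      simp
    have hposall : ∀ q ∈ c :: t, q.1 < q.2 := fun q hq => ((hmem q).1 hq).2
    have hc : c.1 < c.2 := hposall c List.mem_cons_self
    refine ⟨mergeRec_pos t c hc (fun p hp => hposall p (List.mem_cons_of_mem _ hp)),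
      mergeRec_gap t c hle hpw', fun x => ?_⟩
    rw [mergeRec_cover t c x hle hpw']
    constructor
    · rintro ⟨q, hq, hx⟩
      exact ⟨q, ((hmem q).1 hq).1, hx⟩
    · rintro ⟨q, hq, hx⟩
      exact ⟨q, (hmem q).2 ⟨hq, by omega⟩, hx⟩

lemma ms_eq_flatten (L : List (Int × Int)) :
    PySem.List.sorted (PySem.Set.ofList (L.flatMap (fun p => PySem.List.pyRange p.1 p.2 1)))
      (fun x => x) false =
    ((mergeM L).map (fun p => PySem.List.pyRange p.1 p.2 1)).flatten := by
  rcases mergeM_props L with ⟨hpos, hgap, hcov⟩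
  have hCpw : (((mergeM L).map (fun p => PySem.List.pyRange p.1 p.2 1)).flatten).Pairwise
      (· < ·) := by
    rw [List.pairwise_flatten]
    constructor
    · intro l hl
      rcases List.mem_map.1 hl with ⟨p, _, rfl⟩
      exact PySem.List.pairwise_lt_pyRange_one p.1 p.2
    · rw [List.pairwise_map]
      refine hgap.imp ?_
      intro p q h x hx y hy
      rw [PySem.List.mem_pyRange_one] at hx hy
      omega
  have hCmem : ∀ x : Int,
      x ∈ ((mergeM L).map (fun p => PySem.List.pyRange p.1 p.2 1)).flatten ↔
        x ∈ L.flatMap (fun p => PySem.List.pyRange p.1 p.2 1) := by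
    intro x
    rw [List.mem_flatten, List.mem_flatMap]
    constructor
    · rintro ⟨l, hl, hx⟩
      rcases List.mem_map.1 hl with ⟨p, hp, rfl⟩
      rw [PySem.List.mem_pyRange_one] at hx
      rcases (hcov x).1 ⟨p, hp, hx⟩ with ⟨q, hq, hxq⟩
      exact ⟨q, hq, PySem.List.mem_pyRange_one.2 hxq⟩
    · rintro ⟨p, hp, hx⟩
      rw [PySem.List.mem_pyRange_one] at hx
      rcases (hcov x).2 ⟨p, hp, hx⟩ with ⟨q, hq, hxq⟩
      exact ⟨PySem.List.pyRange q.1 q.2 1, List.mem_map.2 ⟨q, hq, rfl⟩,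
        PySem.List.mem_pyRange_one.2 hxq⟩
  refine PySem.List.sorted_eq_of_perm_of_pairwise_lt _ _ _ ?_ hCpw
  refine (List.perm_ext_iff_of_nodup (hCpw.imp (fun hl => ne_of_lt hl))
    (PySem.Set.nodup_ofList _)).2 ?_
  intro a
  rw [hCmem a, PySem.Set.mem_ofList]

-- ===== VERDICT (by name: the statement is the Claim_ definition above) =====
theorem merge_idx_spec : Claim_equal_merge_idx := by
  intro indexes total_len prefix_ suffix _
  unfold Spec_merge_idx
  have hA : merge_idx indexes total_len prefix_ suffix =
      aMain (PySem.List.sorted (PySem.Set.ofList (indexes.foldl (fun acc index =>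
        acc ++ PySem.List.pyRange (max 0 (index - prefix_)) (min total_len (index + suffix + 1)) 1)
        [])) (fun x => x) false) := by
    unfold merge_idx aMain
    rfl
  rw [hA]
  have hraw : indexes.foldl (fun acc index =>
      acc ++ PySem.List.pyRange (max 0 (index - prefix_)) (min total_len (index + suffix + 1)) 1) []
      = (indexes.map (fun i => (max 0 (i - prefix_), min total_len (i + suffix + 1)))).flatMap
          (fun p => PySem.List.pyRange p.1 p.2 1) := by
    rw [PySem.List.foldl_append_eq_flatMap]
    simp [List.flatMap_def, List.map_map, Function.comp_def]
  rw [hraw, ms_eq_flatten]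
  rcases mergeM_props (indexes.map (fun i => (max 0 (i - prefix_), min total_len (i + suffix + 1)))) with
    ⟨hpos, hgap, -⟩
  rw [aMain_flatten _ hpos hgap, alt_eq_mergeM]
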